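-- pv_equiv track=rewrite | github.com/raincomplex/randomizers | statemachine/combine.py | calccomego
-- ===== SOURCE A (Python) =====
-- def calccomego(trans):
--     comefrom = {}  # {dest: {src}}
--     goto = {}  # {src: {dest}}
--     for src, t in trans.items():
--         for _, dest in t:
--             if dest not in comefrom:
--                 comefrom[dest] = set()
--             comefrom[dest].add(src)
--             if src not in goto:
--                 goto[src] = set()
--             goto[src].add(dest)
--     return comefrom, goto
-- ===== SOURCE B (Python) =====
-- def calccomego(trans):
--     # group-by over a flattened edge list: no incremental dict/set updates at all
--     edges = [(src, dest) for src, t in trans.items() for _, dest in t]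
--     comefrom = {d: {s for s, dd in edges if dd == d}
--                 for d in dict.fromkeys(dd for _, dd in edges)}
--     goto = {s: {d for ss, d in edges if ss == s}
--             for s in dict.fromkeys(ss for ss, _ in edges)}
--     return comefrom, goto
-- ===== Notes on version B (the rewrite author's own statement) =====
-- stated objective: alternative
-- what changed: A makes one fused pass over the transitions, incrementally updating two dicts of sets with membership checks; B performs no incremental dict updates at all: it flattens the transitions into an edge list once and computes each dict by a group-by — distinct keys in first-occurrence order via dict.fromkeys, each value set gathered by a comprehension scanning the edge list.
import Mathlib
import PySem

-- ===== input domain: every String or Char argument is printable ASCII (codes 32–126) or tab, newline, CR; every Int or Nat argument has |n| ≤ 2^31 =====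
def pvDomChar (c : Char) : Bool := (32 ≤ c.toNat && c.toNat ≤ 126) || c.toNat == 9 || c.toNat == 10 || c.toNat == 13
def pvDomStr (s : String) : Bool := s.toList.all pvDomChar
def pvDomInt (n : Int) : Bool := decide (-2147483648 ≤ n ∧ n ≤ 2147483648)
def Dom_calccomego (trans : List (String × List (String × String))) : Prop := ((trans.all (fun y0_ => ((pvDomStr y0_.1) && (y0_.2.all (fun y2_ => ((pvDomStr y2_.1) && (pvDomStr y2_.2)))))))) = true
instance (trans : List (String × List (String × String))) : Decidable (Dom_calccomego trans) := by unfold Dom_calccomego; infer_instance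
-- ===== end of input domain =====

-- B replaces A's fused incremental pass (two dicts of sets updated edge by edge) by a group-by over
-- a flattened edge list (distinct keys in first-occurrence order, one scan per key); same results,
-- no speed claim.


-- ===== PORT A =====
def calccomego (trans : List (String × List (String × String))) : (List (String × List String)) × (List (String × List String)) :=
  let st :=
    trans.foldl
      (fun (st : PySem.Dict String (PySem.Set String) × PySem.Dict String (PySem.Set String)) p =>
        p.2.foldl
          (fun st q =>
            let comefrom := if st.1.contains q.2 then st.1 else st.1.insert q.2 PySem.Set.empty
            let comefrom := comefrom.modify q.2 PySem.Set.empty (fun s => PySem.Set.add s p.1)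
            let goto := if st.2.contains p.1 then st.2 else st.2.insert p.1 PySem.Set.empty
            let goto := goto.modify p.1 PySem.Set.empty (fun s => PySem.Set.add s q.2)
            (comefrom, goto))
          st)
      (PySem.Dict.empty, PySem.Dict.empty)
  (st.1.items, st.2.items)

-- ===== PORT B =====
def calccomego_alt (trans : List (String × List (String × String))) : (List (String × List String)) × (List (String × List String)) :=
  let edges := trans.flatMap (fun p => p.2.map (fun q => (p.1, q.2)))
  let comefrom := (PySem.Set.ofList (edges.map (fun e => e.2))).map
      (fun d => (d, PySem.Set.ofList ((edges.filter (fun e => e.2 == d)).map (fun e => e.1))))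
  let goto := (PySem.Set.ofList (edges.map (fun e => e.1))).map
      (fun s => (s, PySem.Set.ofList ((edges.filter (fun e => e.1 == s)).map (fun e => e.2))))
  (comefrom, goto)

-- ===== PRECONDITION & SPEC =====
def Spec_calccomego (trans : List (String × List (String × String))) (out : (List (String × List String)) × (List (String × List String))) : Prop := out = calccomego_alt trans
instance (trans : List (String × List (String × String))) (out : (List (String × List String)) × (List (String × List String))) : Decidable (Spec_calccomego trans out) := by unfold Spec_calccomego; infer_instance

-- ===== CLAIM (what is proved, stated in full; the proofs are below) =====
def Claim_equal_calccomego : Prop := ∀ (trans : List (String × List (String × String))), Dom_calccomego trans → Spec_calccomego trans (calccomego trans)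

-- ===== LEMMAS AND PROOFS =====

-- the grouping step both of A's dicts are built with: d[key].add(val), d[key] defaulting to set()
def addStep (c : PySem.Dict String (PySem.Set String)) (p : String × String) :
    PySem.Dict String (PySem.Set String) :=
  c.modify p.1 PySem.Set.empty (fun s => PySem.Set.add s p.2)

-- the flattened (src, dest) edge list
def edgesOf (trans : List (String × List (String × String))) : List (String × String) :=
  trans.flatMap (fun p => p.2.map (fun q => (p.1, q.2)))

theorem ifins_modify (d : PySem.Dict String (PySem.Set String)) (k : String)
    (f : PySem.Set String → PySem.Set String) :
    ((if d.contains k then d else d.insert k PySem.Set.empty).modify k PySem.Set.empty f)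
      = d.modify k PySem.Set.empty f := by
  by_cases h : d.contains k
  · simp [h]
  · have hc : d.contains k = false := by simpa using h
    have h0 := PySem.Dict.getD_of_not_contains d ([] : PySem.Set String) hc
    simp only [hc, Bool.false_eq_true, if_false]
    simp [PySem.Dict.modify, PySem.Dict.getD_insert_self, PySem.Dict.insert_insert_self, h0]

-- A's fused fold splits into two independent grouping folds over the flattened edge list
theorem A_split (trans : List (String × List (String × String))) :
    calccomego trans =
      ((((edgesOf trans).map (fun e => (e.2, e.1))).foldl addStep PySem.Dict.empty).items,
       ((edgesOf trans).foldl addStep PySem.Dict.empty).items) := by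
  have key : (trans.foldl
      (fun (st : PySem.Dict String (PySem.Set String) × PySem.Dict String (PySem.Set String)) p =>
        p.2.foldl
          (fun st q =>
            let comefrom := if st.1.contains q.2 then st.1 else st.1.insert q.2 PySem.Set.empty
            let comefrom := comefrom.modify q.2 PySem.Set.empty (fun s => PySem.Set.add s p.1)
            let goto := if st.2.contains p.1 then st.2 else st.2.insert p.1 PySem.Set.empty
            let goto := goto.modify p.1 PySem.Set.empty (fun s => PySem.Set.add s q.2)
            (comefrom, goto))
          st)
      (PySem.Dict.empty, PySem.Dict.empty))
      = (trans.foldl (fun c p => p.2.foldl (fun c q => addStep c (q.2, p.1)) c) PySem.Dict.empty,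
         trans.foldl (fun g p => p.2.foldl (fun g q => addStep g (p.1, q.2)) g) PySem.Dict.empty) := by
    rw [← PySem.List.foldl_prod_mk
      (fun c (p : String × List (String × String)) => p.2.foldl (fun c q => addStep c (q.2, p.1)) c)
      (fun g (p : String × List (String × String)) => p.2.foldl (fun g q => addStep g (p.1, q.2)) g)
      trans PySem.Dict.empty PySem.Dict.empty]
    apply PySem.List.foldl_congr_mem
    intro st p _
    rw [← PySem.List.foldl_prod_mk
      (fun c (q : String × String) => addStep c (q.2, p.1))
      (fun g (q : String × String) => addStep g (p.1, q.2)) p.2 st.1 st.2]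
    apply PySem.List.foldl_congr_mem
    intro st q _
    simp only [addStep, ifins_modify]
  show (_, _) = _
  rw [key]
  unfold edgesOf
  rw [List.map_flatMap, List.foldl_flatMap, List.foldl_flatMap]
  simp only [List.foldl_map, List.map_map, Function.comp_def]

-- value of the grouping fold at one key
theorem getD_foldl_addStep (l : List (String × String)) (c : PySem.Dict String (PySem.Set String))
    (k : String) :
    (l.foldl addStep c).getD k PySem.Set.empty
      = PySem.Set.update (c.getD k PySem.Set.empty)
          ((l.filter (fun p => p.1 == k)).map (fun p => p.2)) := by
  induction l generalizing c with
  | nil => simp [PySem.Set.update]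
  | cons p l ih =>
    simp only [List.foldl_cons, List.filter_cons]
    by_cases h : p.1 = k
    · subst h
      simp only [BEq.rfl, if_true, List.map_cons, PySem.Set.update_cons, ih]
      rw [show (addStep c p).getD p.1 PySem.Set.empty
            = PySem.Set.add (c.getD p.1 PySem.Set.empty) p.2 from
          PySem.Dict.getD_modify_self c p.1 PySem.Set.empty _]
    · have hb : (p.1 == k) = false := by simpa using h
      simp only [hb, Bool.false_eq_true, if_false, ih]
      rw [show (addStep c p).getD k PySem.Set.empty = c.getD k PySem.Set.empty from
        PySem.Dict.getD_modify_of_ne c PySem.Set.empty _ (fun hh => h hh.symm)]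

-- items of the set-grouping fold, in group-by normal form
theorem items_groupAdd (l : List (String × String)) :
    ((l.foldl addStep PySem.Dict.empty).items)
      = (PySem.Set.ofList (l.map (fun p => p.1))).map
          (fun k => (k, PySem.Set.ofList ((l.filter (fun p => p.1 == k)).map (fun p => p.2)))) := by
  have hk : (l.foldl addStep PySem.Dict.empty).keys = PySem.Set.ofList (l.map (fun p => p.1)) := by
    have := PySem.Dict.keys_foldl_modify_key l (fun p => p.1) PySem.Set.empty
      (fun _ p => fun s => PySem.Set.add s p.2) PySem.Dict.empty
    simpa [addStep, PySem.Dict.keys_empty, PySem.Set.update_nil_left] using this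
  have hnd : (l.foldl addStep PySem.Dict.empty).keys.Nodup := by
    rw [hk]; exact PySem.Set.nodup_ofList _
  rw [PySem.Dict.items_eq_map_keys _ hnd PySem.Set.empty, hk]
  refine List.map_congr_left fun k _ => ?_
  rw [getD_foldl_addStep, PySem.Dict.getD_empty]
  simp only [PySem.Set.empty, PySem.Set.update_nil_left]

-- ===== VERDICT (by name: the statement is the Claim_ definition above) =====
theorem calccomego_spec : Claim_equal_calccomego := by
  intro trans _
  unfold Spec_calccomego
  rw [A_split]
  simp only [calccomego_alt]
  rw [Prod.mk.injEq]
  constructor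
  · rw [items_groupAdd]
    simp only [List.map_map, Function.comp_def, List.filter_map, List.map_map]
    rfl
  · rw [items_groupAdd]
    rfl
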